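-- pv_equiv track=rewrite | github.com/TeacherChae/boj | Silver/백준_24495번.py | is_c_possible
-- ===== SOURCE A (Python) =====
-- from itertools import combinations_with_replacement
--
-- def beats(die1, die2):
--     """die1이 die2를 이기면 True, 아니면 False를 반환 (16번 비교)"""
--     win1 = win2 = 0
--     for x in die1:
--         for y in die2:
--             if x > y:
--                 win1 += 1
--             elif x < y:
--                 win2 += 1
--     return win1 > win2
--
-- def candidate_possible(strong, weak, candidate):
--     """
--     candidate가 강한 주사위(strong)를 이기고, 약한 주사위(weak)에게 지는지 확인.
--     candidate와 강한 주사위의 면 4×4 비교에서 candidate가 이기는 횟수가 9 이상이어야 하고,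
--     약한 주사위와 candidate의 비교에서 약한 주사위가 이기는 횟수가 9 이상이어야 함.
--     """
--     win_count = 0
--     for c in candidate:
--         for s in strong:
--             if c > s:
--                 win_count += 1
--     loss_count = 0
--     for t in weak:
--         for c in candidate:
--             if t > c:
--                 loss_count += 1
--     return win_count >= 9 and loss_count >= 9
--
-- def is_c_possible(a, b):
--     # 먼저 a와 b 중 어느 쪽이 강한 주사위인지 정한다.
--     if beats(a, b):
--         strong, weak = a, b
--     elif beats(b, a):
--         strong, weak = b, a
--     else:
--         # a와 b가 비기는 경우에는 비이행적 구조를 만들기 어렵다고 봄.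
--         return False
--
--     # 극단 조건: 강한 주사위에 10이 3개 이상 있거나, 약한 주사위에 1이 3개 이상 있으면 candidate C는 절대 불가능.
--     if strong.count(10) >= 3 or weak.count(1) >= 3:
--         return False
--
--     # 정렬하여 비교를 단순화 (순서는 상관없으므로)
--     strong = sorted(strong)
--     weak = sorted(weak)
--
--     # candidate die의 면은 순서와 상관없이 조합으로 볼 수 있으므로, 오름차순 조합(중복 허용)으로 후보를 생성.
--     # 경우의 수: (10 + 4 - 1)C4 = 715가지.
--     for candidate in combinations_with_replacement(range(1, 11), 4):
--         if candidate_possible(strong, weak, candidate):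
--             return True  # 조건을 만족하는 candidate가 하나라도 있으면 존재함.
--     return False
-- ===== SOURCE B (Python) =====
-- def is_c_possible(a, b):
--     # Decide the stronger die by the net score of the all-pairs comparison.
--     net = 0
--     for x in a:
--         for y in b:
--             if x > y:
--                 net += 1
--             elif x < y:
--                 net -= 1
--     if net > 0:
--         strong, weak = a, b
--     elif net < 0:
--         strong, weak = b, a
--     else:
--         return False
--     if strong.count(10) >= 3 or weak.count(1) >= 3:
--         return False
--     # One pass over the face values 1..10: wins[i] / losses[i] for face value i+1.
--     wins = [sum(1 for s in strong if v > s) for v in range(1, 11)]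
--     losses = [sum(1 for t in weak if t > v) for v in range(1, 11)]
--     # DP over the 4 candidate faces: best[w] = maximal loss total among partial
--     # candidates whose win total, capped at 9, equals w (-1 = unreachable).
--     best = [0] + [-1] * 9
--     for _ in range(4):
--         best = [max([best[w] + losses[i]
--                      for w in range(10) for i in range(10)
--                      if best[w] >= 0 and min(w + wins[i], 9) == w2],
--                     default=-1)
--                 for w2 in range(10)]
--     return best[9] >= 9
-- ===== Notes on version B (the rewrite author's own statement) =====
-- stated objective: alternative
-- what changed: Replaces the 715-candidate enumeration with per-candidate 4xN rescans by one pass that tabulates wins/losses per face value 1..10 followed by a constant-size dynamic program over the 4 candidate faces (max loss total per capped win total), so no candidate list is ever enumerated; the all-pairs strong/weak comparison (shared by both) still dominates on large dice.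
import Mathlib
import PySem

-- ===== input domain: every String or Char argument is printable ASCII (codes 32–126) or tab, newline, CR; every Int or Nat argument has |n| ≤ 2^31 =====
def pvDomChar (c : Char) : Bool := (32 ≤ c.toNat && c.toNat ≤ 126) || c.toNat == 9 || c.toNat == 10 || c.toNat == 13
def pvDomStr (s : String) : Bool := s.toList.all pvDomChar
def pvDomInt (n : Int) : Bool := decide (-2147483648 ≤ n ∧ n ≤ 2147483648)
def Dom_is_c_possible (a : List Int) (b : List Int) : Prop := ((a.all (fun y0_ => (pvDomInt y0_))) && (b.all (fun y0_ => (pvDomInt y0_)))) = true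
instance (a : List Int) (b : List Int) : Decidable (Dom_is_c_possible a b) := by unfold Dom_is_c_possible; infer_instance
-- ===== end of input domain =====

-- B replaces A's 715-candidate enumeration with precomputed win/loss tables for the
-- face values 1..10 and a constant-size dynamic program over the 4 candidate faces
-- (objective: alternative algorithm for the candidate search; same return value).

-- ===== PORT A =====
def pvBeats (die1 die2 : List Int) : Bool :=
  let p := die1.foldl (fun (acc : Int × Int) x =>
    die2.foldl (fun (acc : Int × Int) y =>
      if x > y then (acc.1 + 1, acc.2)
      else if x < y then (acc.1, acc.2 + 1)
      else acc) acc) (0, 0)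
  p.1 > p.2

def pvCandidatePossible (strong weak candidate : List Int) : Bool :=
  let win_count := candidate.foldl (fun acc c =>
    strong.foldl (fun acc s => if c > s then acc + 1 else acc) acc) (0 : Int)
  let loss_count := weak.foldl (fun acc t =>
    candidate.foldl (fun acc c => if t > c then acc + 1 else acc) acc) (0 : Int)
  win_count ≥ 9 && loss_count ≥ 9

-- itertools.combinations_with_replacement(range(1, 11), 4): nondecreasing tuples
-- over the value pool in lexicographic order (port of the library call; the pool
-- starts as range(1, 11) and pvCWRgo walks its suffixes).
def pvCWRgo (f : List Int → List (List Int)) : List Int → List (List Int)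
  | [] => []
  | v :: rest => ((f (v :: rest)).map (fun c => v :: c)) ++ pvCWRgo f rest

def pvCWR : Nat → List Int → List (List Int)
  | 0, _ => [[]]
  | (k + 1), vs => pvCWRgo (pvCWR k) vs

def pvAfterA (strong weak : List Int) : Bool :=
  if PySem.List.count strong 10 ≥ 3 || PySem.List.count weak 1 ≥ 3 then false
  else
    let strong' := PySem.List.sorted strong (fun x => x) false
    let weak' := PySem.List.sorted weak (fun x => x) false
    (pvCWR 4 (PySem.List.pyRange 1 11 1)).any (fun candidate => pvCandidatePossible strong' weak' candidate)

def is_c_possible (a : List Int) (b : List Int) : Bool :=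
  if pvBeats a b then pvAfterA a b
  else if pvBeats b a then pvAfterA b a
  else false

-- ===== PORT B =====
def pvNet (a b : List Int) : Int :=
  a.foldl (fun acc x =>
    b.foldl (fun acc y =>
      if x > y then acc + 1 else if x < y then acc - 1 else acc) acc) 0

-- one DP step: new best[w2] = max over reachable (w, i) pairs of best[w] + losses[i]
def pvStep (wins losses best : List Int) : List Int :=
  (List.range 10).map (fun (w2 : Nat) =>
    ((List.range 10).flatMap (fun (w : Nat) =>
      (List.range 10).filterMap (fun (i : Nat) =>
        if best.getD w (-1) ≥ 0 && (min ((w : Int) + wins.getD i 0) 9 == (w2 : Int))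
        then some (best.getD w (-1) + losses.getD i 0) else none))).foldl max (-1))

def pvAfterB (strong weak : List Int) : Bool :=
  if PySem.List.count strong 10 ≥ 3 || PySem.List.count weak 1 ≥ 3 then false
  else
    let wins := (PySem.List.pyRange 1 11 1).map (fun v =>
      strong.foldl (fun acc s => if v > s then acc + 1 else acc) (0 : Int))
    let losses := (PySem.List.pyRange 1 11 1).map (fun v =>
      weak.foldl (fun acc t => if t > v then acc + 1 else acc) (0 : Int))
    let b0 : List Int := 0 :: List.replicate 9 (-1)
    let b4 := pvStep wins losses (pvStep wins losses (pvStep wins losses (pvStep wins losses b0)))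
    b4.getD 9 (-1) ≥ 9

def is_c_possible_alt (a : List Int) (b : List Int) : Bool :=
  let net := pvNet a b
  if net > 0 then pvAfterB a b
  else if net < 0 then pvAfterB b a
  else false

-- ===== PRECONDITION & SPEC =====
def Spec_is_c_possible (a : List Int) (b : List Int) (out : Bool) : Prop := out = is_c_possible_alt a b
instance (a : List Int) (b : List Int) (out : Bool) : Decidable (Spec_is_c_possible a b out) := by unfold Spec_is_c_possible; infer_instance

-- ===== CLAIM (what is proved, stated in full; the proofs are below) =====
def Claim_equal_is_c_possible : Prop := ∀ (a : List Int) (b : List Int), Dom_is_c_possible a b → Spec_is_c_possible a b (is_c_possible a b)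

-- ===== LEMMAS AND PROOFS =====

-- counting helpers used only by the proofs
def cntG (x : Int) (l : List Int) : Int := (l.countP (fun y => decide (y < x)) : Int)
def cLT (v : Int) (l : List Int) : Int := (l.countP (fun t => decide (v < t)) : Int)
def sGT (a b : List Int) : Int := (a.map (fun x => cntG x b)).sum
def sLT (a b : List Int) : Int := (a.map (fun x => ((b.countP (fun y => decide (x < y)) : Nat) : Int))).sum
def wSum (f : Nat → Int) (c : List Nat) : Int := (c.map f).sum

lemma sum_countP_swap (r : Int → Int → Bool) (a b : List Int) :
    (a.map (fun x => ((b.countP (fun y => r x y) : Nat) : Int))).sum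
      = (b.map (fun y => ((a.countP (fun x => r x y) : Nat) : Int))).sum := by
  induction a with
  | nil => simp
  | cons x a' ih =>
    have h : (fun y => ((List.countP (fun x' => r x' y) (x :: a') : Nat) : Int))
        = fun y => (if r x y then (1:Int) else 0) + ((List.countP (fun x' => r x' y) a' : Nat) : Int) := by
      funext y
      simp [List.countP_cons]
      split <;> omega
    rw [h, PySem.List.sum_map_add_int, PySem.List.sum_map_ite_one_zero, ← ih]
    simp

lemma sLT_eq_sGT_swap (a b : List Int) : sLT a b = sGT b a := by
  unfold sLT sGT cntG
  rw [sum_countP_swap (fun x y => decide (x < y)) a b]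

lemma sum_map_sub_int (a : List Int) (f g : Int → Int) :
    (a.map (fun x => f x - g x)).sum = (a.map f).sum - (a.map g).sum := by
  induction a with
  | nil => simp
  | cons x a' ih => simp only [List.map_cons, List.sum_cons, ih]; ring

lemma pvBeats_eq (a b : List Int) : pvBeats a b = decide (sLT a b < sGT a b) := by
  unfold pvBeats
  have hinner : ∀ (x : Int) (acc : Int × Int),
      b.foldl (fun acc y => if x > y then (acc.1 + 1, acc.2)
        else if x < y then (acc.1, acc.2 + 1) else acc) acc
      = (acc.1 + cntG x b, acc.2 + ((b.countP (fun y => decide (x < y)) : Nat) : Int)) := by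
    intro x acc
    obtain ⟨a1, a2⟩ := acc
    rw [PySem.List.foldl_congr_mem b _
      (fun acc y => ((fun (u : Int) (y : Int) => if y < x then u + 1 else u) acc.1 y,
                     (fun (u : Int) (y : Int) => if x < y then u + 1 else u) acc.2 y)) (a1, a2) ?_]
    · rw [PySem.List.foldl_prod_mk (fun (u : Int) (y : Int) => if y < x then u + 1 else u)
        (fun (u : Int) (y : Int) => if x < y then u + 1 else u) b a1 a2,
        PySem.List.foldl_ite_add_one (fun y => y < x),
        PySem.List.foldl_ite_add_one (fun y => x < y)]
      simp [cntG]
    · intro acc' y _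
      by_cases h1 : y < x
      · have h2 : ¬ x < y := by omega
        simp [h1, h2, gt_iff_lt]
      · by_cases h2 : x < y
        · simp [h1, h2, gt_iff_lt]
        · simp [h1, h2, gt_iff_lt]
  have hfold : a.foldl (fun acc x => b.foldl (fun acc y => if x > y then (acc.1 + 1, acc.2)
        else if x < y then (acc.1, acc.2 + 1) else acc) acc) ((0 : Int), (0 : Int))
      = (sGT a b, sLT a b) := by
    rw [PySem.List.foldl_congr_mem a _
      (fun acc x => ((fun (u : Int) (x : Int) => u + cntG x b) acc.1 x,
                     (fun (u : Int) (x : Int) => u + ((b.countP (fun y => decide (x < y)) : Nat) : Int)) acc.2 x)) ((0 : Int), (0 : Int))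
      (fun acc x _ => hinner x acc)]
    rw [PySem.List.foldl_prod_mk (fun (u : Int) (x : Int) => u + cntG x b)
      (fun (u : Int) (x : Int) => u + ((b.countP (fun y => decide (x < y)) : Nat) : Int)) a 0 0,
      PySem.List.foldl_add, PySem.List.foldl_add]
    simp [sGT, sLT]
  rw [hfold]

lemma pvNet_eq (a b : List Int) : pvNet a b = sGT a b - sLT a b := by
  unfold pvNet
  have hin : ∀ (x : Int) (acc : Int),
      b.foldl (fun acc y => if x > y then acc + 1 else if x < y then acc - 1 else acc) acc
        = acc + (cntG x b - ((b.countP (fun y => decide (x < y)) : Nat) : Int)) := by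
    intro x
    induction b with
    | nil => intro acc; simp [cntG]
    | cons y b' ih =>
      intro acc
      simp only [List.foldl_cons, List.countP_cons, cntG]
      by_cases h1 : y < x
      · have h2 : ¬ x < y := by omega
        rw [if_pos h1, ih]
        simp only [cntG]
        simp [h1, h2]
        omega
      · by_cases h2 : x < y
        · rw [if_neg (by omega : ¬ x > y), if_pos h2, ih]
          simp only [cntG]
          simp [h1, h2]
          omega
        · rw [if_neg (by omega : ¬ x > y), if_neg h2, ih]
          simp only [cntG]
          simp [h1, h2]
  rw [PySem.List.foldl_congr_mem a _
    (fun acc x => acc + (cntG x b - ((b.countP (fun y => decide (x < y)) : Nat) : Int))) 0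
    (fun acc x _ => hin x acc)]
  rw [PySem.List.foldl_add, sum_map_sub_int]
  simp [sGT, sLT]

lemma candidate_eq (s w c : List Int) :
    pvCandidatePossible s w c = (decide (9 ≤ sGT c s) && decide (9 ≤ sGT w c)) := by
  unfold pvCandidatePossible
  have h1 : ∀ (x : Int) (acc : Int),
      s.foldl (fun acc s' => if x > s' then acc + 1 else acc) acc = acc + cntG x s := by
    intro x acc
    rw [show (fun (acc : Int) s' => if x > s' then acc + 1 else acc)
        = (fun (acc : Int) s' => if s' < x then acc + 1 else acc) from rfl,
      PySem.List.foldl_ite_add_one (fun s' => s' < x)]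
    simp [cntG]
  have h2 : ∀ (t : Int) (acc : Int),
      c.foldl (fun acc c' => if t > c' then acc + 1 else acc) acc = acc + cntG t c := by
    intro t acc
    rw [show (fun (acc : Int) c' => if t > c' then acc + 1 else acc)
        = (fun (acc : Int) c' => if c' < t then acc + 1 else acc) from rfl,
      PySem.List.foldl_ite_add_one (fun c' => c' < t)]
    simp [cntG]
  rw [PySem.List.foldl_congr_mem c _ (fun acc x => acc + cntG x s) 0 (fun acc x _ => h1 x acc),
    PySem.List.foldl_congr_mem w _ (fun acc t => acc + cntG t c) 0 (fun acc t _ => h2 t acc),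
    PySem.List.foldl_add, PySem.List.foldl_add]
  simp only [sGT, ge_iff_le, zero_add]
  rfl

def DPGood (wf lf : Nat → Int) (k : Nat) (best : List Int) : Prop :=
  best.length = 10 ∧ ∀ w2 : Nat, w2 < 10 →
    (∀ c : List Nat, c.length = k → (∀ i ∈ c, i < 10) →
        min (wSum wf c) 9 = (w2 : Int) → wSum lf c ≤ best.getD w2 (-1)) ∧
    (0 ≤ best.getD w2 (-1) → ∃ c : List Nat, c.length = k ∧ (∀ i ∈ c, i < 10) ∧
        min (wSum wf c) 9 = (w2 : Int) ∧ wSum lf c = best.getD w2 (-1))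

lemma wSum_nonneg (f : Nat → Int) (c : List Nat) (h : ∀ i ∈ c, 0 ≤ f i) : 0 ≤ wSum f c := by
  apply List.sum_nonneg
  intro x hx
  obtain ⟨j, hj, rfl⟩ := List.mem_map.mp hx
  exact h j hj

lemma wSum_cons (f : Nat → Int) (i : Nat) (c : List Nat) : wSum f (i :: c) = f i + wSum f c := by
  simp [wSum]

lemma dp_base (wf lf : Nat → Int) : DPGood wf lf 0 (0 :: List.replicate 9 (-1)) := by
  refine ⟨by simp, ?_⟩
  intro w2 hw2
  have hget : (0 :: List.replicate 9 (-1) : List Int).getD w2 (-1)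
      = if w2 = 0 then 0 else -1 := by
    interval_cases w2 <;> simp
  constructor
  · intro c hc _ hmin
    rw [List.length_eq_zero_iff.mp hc] at hmin ⊢
    have h0 : w2 = 0 := by
      simp [wSum] at hmin
      omega
    simp [wSum, h0]
  · intro hpos
    rw [hget] at hpos
    by_cases h0 : w2 = 0
    · subst h0
      exact ⟨[], rfl, by simp, by simp [wSum], by simp [wSum]⟩
    · rw [if_neg h0] at hpos
      omega

lemma dp_step (wins losses best : List Int) (k : Nat)
    (hw : ∀ i : Nat, i < 10 → 0 ≤ wins.getD i 0)
    (hl : ∀ i : Nat, i < 10 → 0 ≤ losses.getD i 0)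
    (hg : DPGood (fun i => wins.getD i 0) (fun i => losses.getD i 0) k best) :
    DPGood (fun i => wins.getD i 0) (fun i => losses.getD i 0) (k + 1) (pvStep wins losses best) := by
  obtain ⟨hlen, hmain⟩ := hg
  refine ⟨by simp [pvStep], ?_⟩
  intro w2 hw2
  have hget : (pvStep wins losses best).getD w2 (-1) =
      ((List.range 10).flatMap (fun w => (List.range 10).filterMap (fun i =>
        if best.getD w (-1) ≥ 0 && (min ((w : Int) + wins.getD i 0) 9 == (w2 : Int))
        then some (best.getD w (-1) + losses.getD i 0) else none))).foldl max (-1) := by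
    unfold pvStep
    exact PySem.List.getD_map_range _ _ _ _ hw2
  have hmem : ∀ x : Int, (x ∈ (List.range 10).flatMap (fun w => (List.range 10).filterMap (fun i =>
        if best.getD w (-1) ≥ 0 && (min ((w : Int) + wins.getD i 0) 9 == (w2 : Int))
        then some (best.getD w (-1) + losses.getD i 0) else none))) ↔
      ∃ w, w < 10 ∧ ∃ i, i < 10 ∧ 0 ≤ best.getD w (-1) ∧
        min ((w : Int) + wins.getD i 0) 9 = (w2 : Int) ∧ x = best.getD w (-1) + losses.getD i 0 := by
    intro x
    simp only [List.mem_flatMap, List.mem_filterMap, List.mem_range,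
      Option.ite_none_right_eq_some, Bool.and_eq_true, decide_eq_true_eq, beq_iff_eq,
      ge_iff_le, Option.some.injEq]
    constructor
    · rintro ⟨w, hw10, i, hi10, ⟨⟨hb, hmin⟩, hx⟩⟩
      exact ⟨w, hw10, i, hi10, hb, hmin, hx.symm⟩
    · rintro ⟨w, hw10, i, hi10, hb, hmin, hx⟩
      exact ⟨w, hw10, i, hi10, ⟨⟨hb, hmin⟩, hx.symm⟩⟩
  constructor
  · -- upper bound
    intro c hc hcm hmin
    rw [hget]
    obtain ⟨i, c', rfl⟩ : ∃ i c', c = i :: c' := by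
      cases c with
      | nil => simp at hc
      | cons i c' => exact ⟨i, c', rfl⟩
    have hci : i < 10 := hcm i (by simp)
    have hc'len : c'.length = k := by simpa using hc
    have hc'm : ∀ j ∈ c', j < 10 := fun j hj => hcm j (by simp [hj])
    have hWnn : 0 ≤ wSum (fun i => wins.getD i 0) c' :=
      wSum_nonneg _ _ (fun j hj => hw j (hc'm j hj))
    have hLnn : 0 ≤ wSum (fun i => losses.getD i 0) c' :=
      wSum_nonneg _ _ (fun j hj => hl j (hc'm j hj))
    set wn : Nat := (min (wSum (fun i => wins.getD i 0) c') 9).toNat with hwndef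
    have hwn10 : wn < 10 := by omega
    have hwncast : min (wSum (fun i => wins.getD i 0) c') 9 = (wn : Int) := by omega
    have hub := (hmain wn hwn10).1 c' hc'len hc'm hwncast
    have hbnn : 0 ≤ best.getD wn (-1) := le_trans hLnn hub
    have hwi : 0 ≤ wins.getD i 0 := hw i hci
    have hmin' : min ((wn : Int) + wins.getD i 0) 9 = (w2 : Int) := by
      rw [wSum_cons] at hmin
      omega
    have helem : best.getD wn (-1) + losses.getD i 0 ∈
        (List.range 10).flatMap (fun w => (List.range 10).filterMap (fun i =>
          if best.getD w (-1) ≥ 0 && (min ((w : Int) + wins.getD i 0) 9 == (w2 : Int))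
          then some (best.getD w (-1) + losses.getD i 0) else none)) :=
      (hmem _).mpr ⟨wn, hwn10, i, hci, hbnn, hmin', rfl⟩
    calc wSum (fun i => losses.getD i 0) (i :: c')
        = losses.getD i 0 + wSum (fun i => losses.getD i 0) c' := wSum_cons _ _ _
      _ ≤ losses.getD i 0 + best.getD wn (-1) := by omega
      _ = best.getD wn (-1) + losses.getD i 0 := by ring
      _ ≤ _ := (PySem.List.le_foldl_max _ _).2 _ helem
  · -- witness
    intro hpos
    rw [hget] at hpos
    rcases PySem.List.foldl_max_mem ((List.range 10).flatMap (fun w => (List.range 10).filterMap (fun i =>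
        if best.getD w (-1) ≥ 0 && (min ((w : Int) + wins.getD i 0) 9 == (w2 : Int))
        then some (best.getD w (-1) + losses.getD i 0) else none))) (-1) with hcase | hcase
    · rw [hcase] at hpos
      exact absurd hpos (by norm_num)
    · obtain ⟨w, hw10, i, hi10, hb, hmincond, hmeq⟩ := (hmem _).mp hcase
      obtain ⟨c', hlen', hmem', hmin', hsum'⟩ := (hmain w hw10).2 hb
      refine ⟨i :: c', by simp [hlen'], ?_, ?_, ?_⟩
      · intro j hj
        rcases List.mem_cons.mp hj with rfl | hj'
        · exact hi10
        · exact hmem' j hj'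
      · rw [wSum_cons]
        have hwi : 0 ≤ wins.getD i 0 := hw i hi10
        have hWnn : 0 ≤ wSum (fun i => wins.getD i 0) c' :=
          wSum_nonneg _ _ (fun j hj => hw j (hmem' j hj))
        omega
      · simp only [wSum_cons, hget, hmeq, hsum']
        ring

lemma dp_final (wins losses b4 : List Int)
    (hg : DPGood (fun i => wins.getD i 0) (fun i => losses.getD i 0) 4 b4) :
    (9 ≤ b4.getD 9 (-1)) ↔ ∃ c : List Nat, c.length = 4 ∧ (∀ i ∈ c, i < 10) ∧
      9 ≤ wSum (fun i => wins.getD i 0) c ∧ 9 ≤ wSum (fun i => losses.getD i 0) c := by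
  obtain ⟨hlen, hmain⟩ := hg
  constructor
  · intro h9
    obtain ⟨c, hc1, hc2, hc3, hc4⟩ := (hmain 9 (by omega)).2 (by omega)
    exact ⟨c, hc1, hc2, by omega, by omega⟩
  · rintro ⟨c, hc1, hc2, hc3, hc4⟩
    have := (hmain 9 (by omega)).1 c hc1 hc2 (by omega)
    omega

lemma cwr_sound : ∀ (k : Nat) (vs : List Int) (c : List Int),
    c ∈ pvCWR k vs → c.length = k ∧ ∀ x ∈ c, x ∈ vs := by
  intro k
  induction k with
  | zero =>
    intro vs c hc
    simp only [pvCWR, List.mem_singleton] at hc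
    subst hc
    simp
  | succ k ih =>
    intro vs
    induction vs with
    | nil =>
      intro c hc
      simp [pvCWR, pvCWRgo] at hc
    | cons v rest ihv =>
      intro c hc
      simp only [pvCWR, pvCWRgo, List.mem_append, List.mem_map] at hc
      rcases hc with ⟨c', hc', rfl⟩ | hc
      · obtain ⟨hl, hm⟩ := ih (v :: rest) c' hc'
        refine ⟨by simp [hl], ?_⟩
        intro x hx
        rcases List.mem_cons.mp hx with rfl | hx'
        · simp
        · exact hm x hx'
      · obtain ⟨hl, hm⟩ := ihv c hc
        exact ⟨hl, fun x hx => List.mem_cons_of_mem v (hm x hx)⟩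

lemma cwr_complete : ∀ (k : Nat) (c vs : List Int), c.length = k →
    c.Pairwise (· ≤ ·) → vs.Pairwise (· < ·) → (∀ x ∈ c, x ∈ vs) → c ∈ pvCWR k vs := by
  intro k
  induction k with
  | zero =>
    intro c vs hlen _ _ _
    simp [pvCWR, List.length_eq_zero_iff.mp hlen]
  | succ k ih =>
    intro c vs hlen hpc hpv hmem
    obtain ⟨x, c', rfl⟩ : ∃ x c', c = x :: c' := by
      cases c with
      | nil => simp at hlen
      | cons x c' => exact ⟨x, c', rfl⟩
    have hx_le : ∀ y ∈ c', x ≤ y := (List.pairwise_cons.mp hpc).1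
    have main : ∀ vs' : List Int, vs'.Pairwise (· < ·) → (∀ y ∈ x :: c', y ∈ vs') →
        x :: c' ∈ pvCWR (k + 1) vs' := by
      intro vs'
      induction vs' with
      | nil =>
        intro _ hm
        exact absurd (hm x (by simp)) (by simp)
      | cons v rest ihv =>
        intro hpv' hm
        show x :: c' ∈ pvCWRgo (pvCWR k) (v :: rest)
        by_cases hvx : v = x
        · subst hvx
          simp only [pvCWRgo, List.mem_append, List.mem_map]
          left
          refine ⟨c', ?_, rfl⟩
          exact ih c' (v :: rest) (by simpa using hlen) (List.pairwise_cons.mp hpc).2 hpv'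
            (fun y hy => hm y (by simp [hy]))
        · have hvlt : ∀ z ∈ rest, v < z := (List.pairwise_cons.mp hpv').1
          have hxr : x ∈ rest := by
            rcases List.mem_cons.mp (hm x (by simp)) with h | h
            · exact absurd h.symm hvx
            · exact h
          have hm' : ∀ y ∈ x :: c', y ∈ rest := by
            intro y hy
            rcases List.mem_cons.mp (hm y hy) with rfl | h
            · exfalso
              have hvx' : y < x := hvlt x hxr
              rcases List.mem_cons.mp hy with rfl | hy'
              · omega
              · have := hx_le _ hy'
                omega
            · exact h
          simp only [pvCWRgo, List.mem_append]
          right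
          exact ihv (List.pairwise_cons.mp hpv').2 hm'
    exact main vs hpv hmem

-- bridges between Int candidate faces (values 1..10) and table indices 0..9
lemma wSum_map_toIdx (c : List Int) (f : Nat → Int) (g : Int → Int)
    (hc : ∀ x ∈ c, 1 ≤ x ∧ x < 11)
    (hf : ∀ x, 1 ≤ x → x < 11 → f ((x - 1).toNat) = g x) :
    wSum f (c.map (fun x => (x - 1).toNat)) = (c.map g).sum := by
  unfold wSum
  rw [List.map_map]
  apply congrArg
  apply List.map_congr_left
  intro x hx
  obtain ⟨h1, h2⟩ := hc x hx
  exact hf x h1 h2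

lemma sGT_eq_sum_cLT (w c : List Int) : sGT w c = (c.map (fun x => cLT x w)).sum := by
  unfold sGT cntG cLT
  exact sum_countP_swap (fun t y => decide (y < t)) w c

lemma getD_table (h : Int → Int) (i : Nat) (hi : i < 10) :
    ((PySem.List.pyRange 1 11 1).map h).getD i 0 = h ((i : Int) + 1) := by
  have hr : PySem.List.pyRange 1 11 1 = [1,2,3,4,5,6,7,8,9,10] := by decide
  rw [hr]
  interval_cases i <;> norm_num

lemma winsList_eq (s : List Int) :
    (PySem.List.pyRange 1 11 1).map (fun v => s.foldl (fun acc s' => if v > s' then acc + 1 else acc) (0 : Int))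
      = (PySem.List.pyRange 1 11 1).map (fun v => cntG v s) := by
  apply List.map_congr_left
  intro v _
  rw [show (fun (acc : Int) s' => if v > s' then acc + 1 else acc)
      = (fun (acc : Int) s' => if s' < v then acc + 1 else acc) from rfl,
    PySem.List.foldl_ite_add_one (fun s' => s' < v)]
  simp [cntG]

lemma lossList_eq (w : List Int) :
    (PySem.List.pyRange 1 11 1).map (fun v => w.foldl (fun acc t => if t > v then acc + 1 else acc) (0 : Int))
      = (PySem.List.pyRange 1 11 1).map (fun v => cLT v w) := by
  apply List.map_congr_left
  intro v _
  rw [show (fun (acc : Int) t => if t > v then acc + 1 else acc)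
      = (fun (acc : Int) t => if v < t then acc + 1 else acc) from rfl,
    PySem.List.foldl_ite_add_one (fun t => v < t)]
  simp [cLT]

lemma after_eq (s w : List Int) : pvAfterA s w = pvAfterB s w := by
  simp only [pvAfterA, pvAfterB]
  split_ifs with hp
  · rfl
  · rw [winsList_eq, lossList_eq, Bool.eq_iff_iff, List.any_eq_true, decide_eq_true_iff]
    set wins := (PySem.List.pyRange 1 11 1).map (fun v => cntG v s) with hwinsdef
    set losses := (PySem.List.pyRange 1 11 1).map (fun v => cLT v w) with hlossdef
    have hwget : ∀ i : Nat, i < 10 → wins.getD i 0 = cntG ((i : Int) + 1) s :=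
      fun i hi => getD_table _ i hi
    have hlget : ∀ i : Nat, i < 10 → losses.getD i 0 = cLT ((i : Int) + 1) w :=
      fun i hi => getD_table _ i hi
    have hwnn : ∀ i : Nat, i < 10 → 0 ≤ wins.getD i 0 := by
      intro i hi
      rw [hwget i hi]
      exact Int.natCast_nonneg _
    have hlnn : ∀ i : Nat, i < 10 → 0 ≤ losses.getD i 0 := by
      intro i hi
      rw [hlget i hi]
      exact Int.natCast_nonneg _
    have hg : DPGood (fun i => wins.getD i 0) (fun i => losses.getD i 0) 4
        (pvStep wins losses (pvStep wins losses (pvStep wins losses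
          (pvStep wins losses (0 :: List.replicate 9 (-1)))))) :=
      dp_step _ _ _ 3 hwnn hlnn (dp_step _ _ _ 2 hwnn hlnn (dp_step _ _ _ 1 hwnn hlnn
        (dp_step _ _ _ 0 hwnn hlnn (dp_base _ _))))
    rw [ge_iff_le, dp_final wins losses _ hg]
    have hsw : ∀ c : List Int, sGT c (PySem.List.sorted s (fun x => x) false) = sGT c s := by
      intro c
      unfold sGT
      apply congrArg
      apply List.map_congr_left
      intro x _
      unfold cntG
      rw [List.Perm.countP_eq _ (PySem.List.sorted_perm s _ _)]
    have hww : ∀ c : List Int, sGT (PySem.List.sorted w (fun x => x) false) c = sGT w c := by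
      intro c
      unfold sGT
      exact List.Perm.sum_eq (List.Perm.map _ (PySem.List.sorted_perm w _ _))
    constructor
    · rintro ⟨c, hcmem, hcp⟩
      obtain ⟨hclen, hcmem'⟩ := cwr_sound 4 _ c hcmem
      have hcb : ∀ x ∈ c, 1 ≤ x ∧ x < 11 := fun x hx =>
        PySem.List.mem_pyRange_one.mp (hcmem' x hx)
      rw [candidate_eq] at hcp
      simp only [Bool.and_eq_true, decide_eq_true_eq] at hcp
      obtain ⟨h9w, h9l⟩ := hcp
      rw [hsw] at h9w
      rw [hww] at h9l
      refine ⟨c.map (fun x => (x - 1).toNat), by simp [hclen], ?_, ?_, ?_⟩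
      · intro i hi
        obtain ⟨x, hx, rfl⟩ := List.mem_map.mp hi
        have := hcb x hx
        omega
      · rw [wSum_map_toIdx c _ (fun x => cntG x s) hcb ?_]
        · exact h9w
        · intro x h1 h2
          rw [hwget ((x - 1).toNat) (by omega)]
          congr 1
          omega
      · rw [wSum_map_toIdx c _ (fun x => cLT x w) hcb ?_]
        · rw [← sGT_eq_sum_cLT]
          exact h9l
        · intro x h1 h2
          rw [hlget ((x - 1).toNat) (by omega)]
          congr 1
          omega
    · rintro ⟨d, hdlen, hdmem, h9w, h9l⟩
      have hc0b : ∀ x ∈ d.map (fun (i : Nat) => ((i : Int) + 1)), 1 ≤ x ∧ x < 11 := by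
        intro x hx
        obtain ⟨i, hi, rfl⟩ := List.mem_map.mp hx
        have := hdmem i hi
        omega
      have hperm : (PySem.List.sorted (d.map (fun (i : Nat) => ((i : Int) + 1))) (fun x => x) false).Perm
          (d.map (fun (i : Nat) => ((i : Int) + 1))) := PySem.List.sorted_perm _ _ _
      have hcb : ∀ x ∈ PySem.List.sorted (d.map (fun (i : Nat) => ((i : Int) + 1))) (fun x => x) false,
          1 ≤ x ∧ x < 11 := fun x hx => hc0b x (hperm.mem_iff.mp hx)
      have hbr1 : sGT (d.map (fun (i : Nat) => ((i : Int) + 1))) s = wSum (fun i => wins.getD i 0) d := by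
        unfold sGT wSum
        rw [List.map_map]
        apply congrArg
        apply List.map_congr_left
        intro i hi
        simp only [Function.comp_apply]
        exact (hwget i (hdmem i hi)).symm
      have hbr2 : sGT w (d.map (fun (i : Nat) => ((i : Int) + 1))) = wSum (fun i => losses.getD i 0) d := by
        rw [sGT_eq_sum_cLT]
        unfold wSum
        rw [List.map_map]
        apply congrArg
        apply List.map_congr_left
        intro i hi
        simp only [Function.comp_apply]
        exact (hlget i (hdmem i hi)).symm
      refine ⟨PySem.List.sorted (d.map (fun (i : Nat) => ((i : Int) + 1))) (fun x => x) false, ?_, ?_⟩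
      · apply cwr_complete
        · rw [PySem.List.length_sorted]
          simp [hdlen]
        · exact PySem.List.sorted_pairwise _ (fun x => x)
        · decide
        · intro x hx
          exact PySem.List.mem_pyRange_one.mpr ⟨(hcb x hx).1, (hcb x hx).2⟩
      · rw [candidate_eq]
        simp only [Bool.and_eq_true, decide_eq_true_eq]
        constructor
        · rw [hsw]
          have h1 : sGT (PySem.List.sorted (d.map (fun (i : Nat) => ((i : Int) + 1))) (fun x => x) false) s
              = sGT (d.map (fun (i : Nat) => ((i : Int) + 1))) s := by
            unfold sGT
            exact List.Perm.sum_eq (hperm.map _)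
          rw [h1, hbr1]
          exact h9w
        · rw [hww]
          have h2 : sGT w (PySem.List.sorted (d.map (fun (i : Nat) => ((i : Int) + 1))) (fun x => x) false)
              = sGT w (d.map (fun (i : Nat) => ((i : Int) + 1))) := by
            unfold sGT
            apply congrArg
            apply List.map_congr_left
            intro t _
            unfold cntG
            rw [List.Perm.countP_eq _ hperm]
          rw [h2, hbr2]
          exact h9l

lemma main_eq (a b : List Int) : is_c_possible a b = is_c_possible_alt a b := by
  unfold is_c_possible is_c_possible_alt
  rw [pvBeats_eq a b, pvBeats_eq b a, pvNet_eq a b, sLT_eq_sGT_swap a b, sLT_eq_sGT_swap b a]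
  by_cases h1 : sGT b a < sGT a b
  · simp [h1, after_eq]
  · by_cases h2 : sGT a b < sGT b a
    · simp [h1, h2, show sGT a b - sGT b a < 0 from by omega, after_eq]
    · simp [h1, h2, show ¬ sGT a b - sGT b a < 0 from by omega]

-- ===== VERDICT (by name: the statement is the Claim_ definition above) =====
theorem is_c_possible_spec : Claim_equal_is_c_possible := by
  intro a b _
  unfold Spec_is_c_possible
  exact main_eq a b
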